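-- pv_equiv track=rewrite | github.com/Yuzuctus/Nectar-Render | src/nectar_render/adapters/rendering/markdown_pipeline.py | _is_position_in_inline_code
-- ===== SOURCE A (Python) =====
-- def _is_position_in_inline_code(markdown_text: str, position: int) -> bool:
--     """Check if a position is inside inline code (backticks).
--
--     Handles single, double, and triple backtick inline code spans correctly.
--     Per CommonMark spec: a code span begins with a backtick string and ends
--     with a backtick string of equal length.
--     """
--     # Find the line containing the position
--     line_start = markdown_text.rfind("\n", 0, position) + 1
--     line_end = markdown_text.find("\n", position)
--     if line_end == -1:
--         line_end = len(markdown_text)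
--     line = markdown_text[line_start:line_end]
--     pos_in_line = position - line_start
--
--     # Parse inline code spans and check if position falls inside one
--     i = 0
--     while i < len(line):
--         if line[i] == "`":
--             # Count opening backticks
--             open_start = i
--             open_ticks = 0
--             while i < len(line) and line[i] == "`":
--                 open_ticks += 1
--                 i += 1
--             # Find matching closing backticks (same length)
--             close_pos = -1
--             j = i
--             while j < len(line):
--                 if line[j] == "`":
--                     close_start = j
--                     close_ticks = 0
--                     while j < len(line) and line[j] == "`":
--                         close_ticks += 1
--                         j += 1
--                     if close_ticks == open_ticks:
--                         close_pos = close_start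
--                         break
--                 else:
--                     j += 1
--             if close_pos != -1:
--                 # Check if position is inside this code span
--                 code_start = open_start + open_ticks
--                 code_end = close_pos
--                 if code_start <= pos_in_line < code_end:
--                     return True
--                 i = close_pos + open_ticks
--             # If no closing found, remaining line is not code (unclosed span)
--         else:
--             i += 1
--
--     return False
-- ===== SOURCE B (Python) =====
-- def _is_position_in_inline_code(markdown_text: str, position: int) -> bool:
--     """Check if a position is inside inline code (backticks).
--
--     One-pass version: tokenize the line's backtick runs once, link each run
--     to the next run of equal length via a single reversed pass with a dict,
--     then walk the run chain — no re-scanning of characters.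
--     """
--     line_start = markdown_text.rfind("\n", 0, position) + 1
--     line_end = markdown_text.find("\n", position)
--     if line_end == -1:
--         line_end = len(markdown_text)
--     line = markdown_text[line_start:line_end]
--     pos = position - line_start
--
--     # Tokenize backtick runs (start, length) in one pass
--     runs = []
--     i = 0
--     n = len(line)
--     while i < n:
--         if line[i] != "`":
--             i += 1
--             continue
--         j = i
--         while j < n and line[j] == "`":
--             j += 1
--         runs.append((i, j - i))
--         i = j
--
--     # Annotate each run with its matching closer (next run of equal length)
--     # in one reversed pass: node = (start, length, match_node, tail_node)
--     ann = None
--     last = {}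
--     for s, length in reversed(runs):
--         ann = (s, length, last.get(length), ann)
--         last[length] = ann
--
--     # Walk the chain: an annotated opener jumps straight past its closer
--     node = ann
--     while node is not None:
--         s, length, match, tail = node
--         if match is None:
--             node = tail
--         elif s + length <= pos < match[0]:
--             return True
--         else:
--             node = match[3]
--     return False
-- ===== Notes on version B (the rewrite author's own statement) =====
-- stated objective: faster
-- what changed: A rescans the line character-by-character for a matching closer after every opening backtick run; B tokenizes the line's backtick runs once, links each run to the next run of equal length in a single reversed dict pass, and then walks that run chain, so no character is scanned twice.
import Mathlib
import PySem

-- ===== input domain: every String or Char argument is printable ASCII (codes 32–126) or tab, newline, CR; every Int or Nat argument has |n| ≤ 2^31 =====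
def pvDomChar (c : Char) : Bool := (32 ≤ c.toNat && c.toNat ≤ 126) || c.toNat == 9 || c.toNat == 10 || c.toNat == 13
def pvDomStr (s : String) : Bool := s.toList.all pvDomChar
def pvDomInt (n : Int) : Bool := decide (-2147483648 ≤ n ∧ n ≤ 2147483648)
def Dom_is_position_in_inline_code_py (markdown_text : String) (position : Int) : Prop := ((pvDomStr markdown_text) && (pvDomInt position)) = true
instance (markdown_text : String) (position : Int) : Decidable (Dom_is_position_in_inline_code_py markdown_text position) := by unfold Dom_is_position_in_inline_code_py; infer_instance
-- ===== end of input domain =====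

-- B replaces A's repeated character rescans for a matching closer by a one-pass tokenization of the
-- backtick runs plus a reversed dict pass linking each run to the next run of equal length (objective: faster).

-- Both Pythons begin with the same four lines extracting the line around `position` and the
-- position inside it; this helper is that shared prelude (rfind / find / slice, Python-exact).
def pvLineAndPos (markdown_text : String) (position : Int) : List Char × Int :=
  let s := markdown_text.toList
  let line_start : Int := PySem.Chars.rfindFrom s ['\n'] 0 (some position) + 1
  let f : Int := PySem.Chars.findFrom s ['\n'] position none
  let line_end : Int := if f = -1 then (s.length : Int) else f
  (PySem.List.slice s (some line_start) (some line_end), position - line_start)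

-- ===== PORT A =====
-- tiny named termination lemmas (kept named so the well-founded definitions stay small)
theorem pvDecStep (n i : Nat) (h : i < n) : n - (i + 1) < n - i := by omega
theorem pvDecRun (n j c : Nat) (h : j < n) (hc : 0 < c) : n - (j + c) < n - j := by omega
theorem pvDecScan (n i t c : Nat) (h : i < n) (ht : 0 < t) (hc : i + t ≤ c) :
    n - (c + t) < n - i := by omega

-- A's inner `while i < len(line) and line[i] == '`'` run counter.
def pvRunLen (l : List Char) (i : Nat) : Nat :=
  if h : i < l.length ∧ l.getD i ' ' = '`' then pvRunLen l (i + 1) + 1 else 0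
termination_by l.length - i
decreasing_by exact pvDecStep _ _ h.1

theorem pvRunLen_pos (l : List Char) (i : Nat) (h1 : i < l.length) (h2 : l.getD i ' ' = '`') :
    0 < pvRunLen l i := by
  rw [pvRunLen, dif_pos ⟨h1, h2⟩]
  omega

-- A's inner `while j < len(line)` search for a closing run of exactly `t` backticks.
def pvFindClose (l : List Char) (t : Nat) (j : Nat) : Option Nat :=
  if h : j < l.length then
    if h2 : l.getD j ' ' = '`' then
      -- ct := close_ticks, counted by the innermost while loop
      if pvRunLen l j = t then some j else pvFindClose l t (j + pvRunLen l j)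
    else pvFindClose l t (j + 1)
  else none
termination_by l.length - j
decreasing_by
  · exact pvDecRun _ _ _ h (pvRunLen_pos l j h h2)
  · exact pvDecStep _ _ h

theorem pvFindClose_ge (l : List Char) (t : Nat) (j : Nat) (c : Nat)
    (h : pvFindClose l t j = some c) : j ≤ c := by
  fun_induction pvFindClose l t j with
  | case1 j h1 h2 hct => simp_all
  | case2 j h1 h2 hct ih =>
      have := pvRunLen_pos l j h1 h2
      have := ih h; omega
  | case3 j h1 h2 ih => have := ih h; omega
  | case4 j h1 => simp_all

-- A's outer `while i < len(line)` loop.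
def pvScanA (l : List Char) (pos : Int) (i : Nat) : Bool :=
  if h : i < l.length then
    if h2 : l.getD i ' ' = '`' then
      -- t := open_ticks, counted by the inner while loop
      match hc : pvFindClose l (pvRunLen l i) (i + pvRunLen l i) with
      | some c =>
          if (((i + pvRunLen l i : Nat) : Int) ≤ pos ∧ pos < (c : Int)) then true
          else pvScanA l pos (c + pvRunLen l i)
      | none => pvScanA l pos (i + pvRunLen l i)
    else pvScanA l pos (i + 1)
  else false
termination_by l.length - i
decreasing_by
  · exact pvDecScan _ _ _ _ h (pvRunLen_pos l i h h2) (pvFindClose_ge l _ _ _ hc)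
  · exact pvDecRun _ _ _ h (pvRunLen_pos l i h h2)
  · exact pvDecStep _ _ h

def is_position_in_inline_code_py (markdown_text : String) (position : Int) : Bool :=
  let lp := pvLineAndPos markdown_text position
  pvScanA lp.1 lp.2 0

-- ===== PORT B =====
-- B's inner `while j < n and line[j] == '`'` advancing j past a run.
def pvRunEnd (l : List Char) (j : Nat) : Nat :=
  if h : j < l.length ∧ l.getD j ' ' = '`' then pvRunEnd l (j + 1) else j
termination_by l.length - j
decreasing_by exact pvDecStep _ _ h.1

theorem pvRunEnd_ge (l : List Char) (j : Nat) : j ≤ pvRunEnd l j := by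
  fun_induction pvRunEnd l j with
  | case1 k hk ih => omega
  | case2 k hk => omega

theorem pvRunEnd_gt (l : List Char) (j : Nat) (h1 : j < l.length) (h2 : l.getD j ' ' = '`') :
    j < pvRunEnd l j := by
  rw [pvRunEnd, dif_pos ⟨h1, h2⟩]
  have := pvRunEnd_ge l (j + 1)
  omega

-- B's tokenizer: the backtick runs of the line as (start, length) pairs, one pass.
def pvTok (l : List Char) (i : Nat) : List (Nat × Nat) :=
  if h : i < l.length then
    if h2 : l.getD i ' ' = '`' then
      let j := pvRunEnd l i
      (i, j - i) :: pvTok l j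
    else pvTok l (i + 1)
  else []
termination_by l.length - i
decreasing_by
  · exact Nat.sub_lt_sub_left h (pvRunEnd_gt l i h h2)
  · exact pvDecStep _ _ h

-- B's annotated node: Python's tuple (start, length, match, tail); `nil` plays Python's None.
inductive PvAnn
  | nil
  | node (s L : Nat) (mtch : PvAnn) (tail : PvAnn)
deriving Repr, DecidableEq

-- B's reversed pass: `for s, L in reversed(runs): ann = (s, L, last.get(L), ann); last[L] = ann`.
def pvBuild (runs : List (Nat × Nat)) : PvAnn × PySem.Dict Nat PvAnn :=
  runs.foldr
    (fun r st =>
      let a := PvAnn.node r.1 r.2 (st.2.getD r.2 PvAnn.nil) st.1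
      (a, st.2.insert r.2 a))
    (PvAnn.nil, PySem.Dict.empty)

-- B's `while node is not None` walk over the run chain.
def pvWalk (pos : Int) : PvAnn → Bool
  | .nil => false
  | .node s L mtch tail =>
    match mtch with
    | .nil => pvWalk pos tail
    | .node c _ _ mtail =>
        if (((s + L : Nat) : Int) ≤ pos ∧ pos < (c : Int)) then true
        else pvWalk pos mtail

def is_position_in_inline_code_py_alt (markdown_text : String) (position : Int) : Bool :=
  let lp := pvLineAndPos markdown_text position
  let runs := pvTok lp.1 0
  pvWalk lp.2 (pvBuild runs).1

-- ===== PRECONDITION & SPEC =====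
def Spec_is_position_in_inline_code_py (markdown_text : String) (position : Int) (out : Bool) : Prop := out = is_position_in_inline_code_py_alt markdown_text position
instance (markdown_text : String) (position : Int) (out : Bool) : Decidable (Spec_is_position_in_inline_code_py markdown_text position out) := by unfold Spec_is_position_in_inline_code_py; infer_instance

-- ===== CLAIM (what is proved, stated in full; the proofs are below) =====
def Claim_equal_is_position_in_inline_code_py : Prop := ∀ (markdown_text : String) (position : Int), Dom_is_position_in_inline_code_py markdown_text position → Spec_is_position_in_inline_code_py markdown_text position (is_position_in_inline_code_py markdown_text position)

-- ===== LEMMAS AND PROOFS =====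

-- Proof-side bridge: first run of length t in a run list, with the remainder after it.
def pvFindSplit (rs : List (Nat × Nat)) (t : Nat) : Option ((Nat × Nat) × List (Nat × Nat)) :=
  match rs with
  | [] => none
  | r :: rest => if r.2 = t then some (r, rest) else pvFindSplit rest t

theorem pvFindSplit_length (rs : List (Nat × Nat)) (t : Nat) (r : Nat × Nat)
    (rs' : List (Nat × Nat)) (h : pvFindSplit rs t = some (r, rs')) :
    rs'.length < rs.length := by
  induction rs generalizing r rs' with
  | nil => simp [pvFindSplit] at h
  | cons x xs ih =>
      rw [pvFindSplit] at h
      split at h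
      · simp only [Option.some.injEq, Prod.mk.injEq] at h
        obtain ⟨-, h2⟩ := h
        subst h2
        simp
      · have := ih _ _ h
        simp only [List.length_cons]
        omega

-- Proof-side bridge: the matching semantics both programs implement, on the run list.
def pvMatchRuns (rs : List (Nat × Nat)) (pos : Int) : Bool :=
  match rs with
  | [] => false
  | (s, L) :: rest =>
    match hm : pvFindSplit rest L with
    | none => pvMatchRuns rest pos
    | some ((c, _), rs') =>
        if (((s + L : Nat) : Int) ≤ pos ∧ pos < (c : Int)) then true
        else pvMatchRuns rs' pos
termination_by rs.length
decreasing_by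
  · exact Nat.lt_succ_self _
  · exact Nat.lt_succ_of_lt (pvFindSplit_length rest L _ _ hm)

-- Proof-side bridge: the annotation B builds, described structurally.
mutual
def pvAnnOf : List (Nat × Nat) → PvAnn
  | [] => .nil
  | (s, L) :: rest => .node s L (pvMatchNode rest L) (pvAnnOf rest)
def pvMatchNode : List (Nat × Nat) → Nat → PvAnn
  | [], _ => .nil
  | (s, L) :: rest, t =>
      if L = t then .node s L (pvMatchNode rest L) (pvAnnOf rest) else pvMatchNode rest t
end

-- ---- A-side: pvScanA computes pvMatchRuns of the token list ----

theorem pvRunEnd_eq (l : List Char) (i : Nat) : pvRunEnd l i = i + pvRunLen l i := by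
  fun_induction pvRunLen l i with
  | case1 j hj ih => rw [pvRunEnd, dif_pos hj]; omega
  | case2 j hj => rw [pvRunEnd, dif_neg hj]; omega

theorem pvFindClose_tok (l : List Char) (t j : Nat) :
    pvFindSplit (pvTok l j) t =
      (pvFindClose l t j).map (fun c => ((c, t), pvTok l (c + t))) := by
  fun_induction pvFindClose l t j with
  | case1 j h1 h2 heq =>
      rw [pvTok, dif_pos h1, dif_pos h2]
      simp only [pvRunEnd_eq, Nat.add_sub_cancel_left]
      subst heq
      simp [pvFindSplit]
  | case2 j h1 h2 hne ih =>
      rw [pvTok, dif_pos h1, dif_pos h2]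
      simp only [pvRunEnd_eq, Nat.add_sub_cancel_left]
      rw [pvFindSplit, if_neg hne, ih]
  | case3 j h1 h2 ih =>
      rw [pvTok, dif_pos h1, dif_neg h2]
      exact ih
  | case4 j h1 =>
      rw [pvTok, dif_neg h1]
      simp [pvFindSplit]

theorem pvMatchRuns_cons_none (s L : Nat) (rest : List (Nat × Nat)) (pos : Int)
    (hfs : pvFindSplit rest L = none) :
    pvMatchRuns ((s, L) :: rest) pos = pvMatchRuns rest pos := by
  rw [pvMatchRuns.eq_def]
  simp only []
  split
  · rfl
  · simp_all

theorem pvMatchRuns_cons_some (s L c u : Nat) (rest rs' : List (Nat × Nat)) (pos : Int)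
    (hfs : pvFindSplit rest L = some ((c, u), rs')) :
    pvMatchRuns ((s, L) :: rest) pos =
      if (((s + L : Nat) : Int) ≤ pos ∧ pos < (c : Int)) then true
      else pvMatchRuns rs' pos := by
  rw [pvMatchRuns.eq_def]
  simp only []
  split
  · simp_all
  · next c' u' rs'' heq =>
      rw [hfs] at heq
      simp only [Option.some.injEq, Prod.mk.injEq] at heq
      obtain ⟨⟨h1, -⟩, h2⟩ := heq
      subst h1; subst h2
      rfl

theorem pvScanA_eq_matchRuns (l : List Char) (pos : Int) (i : Nat) :
    pvScanA l pos i = pvMatchRuns (pvTok l i) pos := by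
  fun_induction pvScanA l pos i with
  | case1 i h h2 c hc hin =>
      rw [pvTok, dif_pos h, dif_pos h2]
      simp only [pvRunEnd_eq, Nat.add_sub_cancel_left]
      have hs := pvFindClose_tok l (pvRunLen l i) (i + pvRunLen l i)
      rw [hc, Option.map_some] at hs
      rw [pvMatchRuns_cons_some _ _ _ _ _ _ _ hs, if_pos hin]
  | case2 i h h2 c hc hin ih =>
      rw [pvTok, dif_pos h, dif_pos h2]
      simp only [pvRunEnd_eq, Nat.add_sub_cancel_left]
      have hs := pvFindClose_tok l (pvRunLen l i) (i + pvRunLen l i)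
      rw [hc, Option.map_some] at hs
      rw [pvMatchRuns_cons_some _ _ _ _ _ _ _ hs, if_neg hin]
      exact ih
  | case3 i h h2 hc ih =>
      rw [pvTok, dif_pos h, dif_pos h2]
      simp only [pvRunEnd_eq, Nat.add_sub_cancel_left]
      have hs := pvFindClose_tok l (pvRunLen l i) (i + pvRunLen l i)
      rw [hc, Option.map_none] at hs
      rw [pvMatchRuns_cons_none _ _ _ _ hs]
      exact ih
  | case4 i h h2 ih =>
      rw [pvTok, dif_pos h, dif_neg h2]
      exact ih
  | case5 i h =>
      rw [pvTok, dif_neg h]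
      simp [pvMatchRuns]

-- ---- B-side: the foldr builds pvAnnOf, and the dict holds pvMatchNode ----

theorem pvBuild_spec (runs : List (Nat × Nat)) :
    (pvBuild runs).1 = pvAnnOf runs ∧
      ∀ L, (pvBuild runs).2.getD L PvAnn.nil = pvMatchNode runs L := by
  induction runs with
  | nil =>
      constructor
      · rfl
      · intro L; simp [pvBuild, pvMatchNode, PySem.Dict.getD_empty]
  | cons r rest ih =>
      obtain ⟨h1, h2⟩ := ih
      obtain ⟨s, L⟩ := r
      constructor
      · show PvAnn.node s L ((pvBuild rest).2.getD L PvAnn.nil) (pvBuild rest).1 = _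
        rw [h1, h2, pvAnnOf]
      · intro L'
        show ((pvBuild rest).2.insert L
            (PvAnn.node s L ((pvBuild rest).2.getD L PvAnn.nil) (pvBuild rest).1)).getD
            L' PvAnn.nil = _
        rw [PySem.Dict.getD_insert, pvMatchNode]
        split
        · next heq =>
            subst heq
            rw [if_pos rfl, h1, h2]
        · next hne =>
            rw [if_neg (fun hh => hne hh.symm), h2]

theorem pvMatchNode_eq_findSplit (rest : List (Nat × Nat)) (t : Nat) :
    pvMatchNode rest t =
      match pvFindSplit rest t with
      | none => PvAnn.nil
      | some ((c, u), rs') => PvAnn.node c u (pvMatchNode rs' u) (pvAnnOf rs') := by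
  induction rest with
  | nil => simp [pvMatchNode, pvFindSplit]
  | cons r rs ih =>
      obtain ⟨s, L⟩ := r
      rw [pvMatchNode, pvFindSplit]
      by_cases hL : L = t
      · subst hL; simp
      · simp only [hL, if_false, ih]

theorem pvFindSplit_snd_eq (rs : List (Nat × Nat)) (t : Nat) (c u : Nat)
    (rs' : List (Nat × Nat)) (h : pvFindSplit rs t = some ((c, u), rs')) : u = t := by
  induction rs generalizing rs' with
  | nil => simp [pvFindSplit] at h
  | cons x xs ih =>
      obtain ⟨a, b⟩ := x
      rw [pvFindSplit] at h
      split at h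
      · next he =>
          simp only [Option.some.injEq, Prod.mk.injEq] at h
          obtain ⟨⟨-, h2⟩, -⟩ := h
          omega
      · exact ih _ h

theorem pvWalk_annOf (pos : Int) (rs : List (Nat × Nat)) :
    pvWalk pos (pvAnnOf rs) = pvMatchRuns rs pos := by
  fun_induction pvMatchRuns rs pos with
  | case1 => simp [pvAnnOf, pvWalk]
  | case2 s L rest hm ih =>
      rw [pvAnnOf, pvMatchNode_eq_findSplit, hm]
      simp only [pvWalk, ih]
  | case3 s L rest c u rs' hm hin =>
      rw [pvAnnOf, pvMatchNode_eq_findSplit, hm]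
      have hu : u = L := pvFindSplit_snd_eq rest L c u rs' hm
      subst hu
      simp only [pvWalk]
      rw [if_pos hin]
  | case4 s L rest c u rs' hm hin ih =>
      rw [pvAnnOf, pvMatchNode_eq_findSplit, hm]
      have hu : u = L := pvFindSplit_snd_eq rest L c u rs' hm
      subst hu
      simp only [pvWalk]
      rw [if_neg hin]
      exact ih

-- ===== VERDICT (by name: the statement is the Claim_ definition above) =====
theorem is_position_in_inline_code_py_spec : Claim_equal_is_position_in_inline_code_py := by
  intro markdown_text position _
  unfold Spec_is_position_in_inline_code_py
  simp only [is_position_in_inline_code_py, is_position_in_inline_code_py_alt]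
  rw [(pvBuild_spec (pvTok (pvLineAndPos markdown_text position).1 0)).1,
    pvWalk_annOf, pvScanA_eq_matchRuns]
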